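-- pv_equiv track=rewrite | github.com/intel/intel-extension-for-pytorch | intel_extension_for_pytorch/cpu/launch.py | get_mpi_pin_domain
-- ===== SOURCE A (Python) =====
-- def get_mpi_pin_domain(nproc_per_node, ccl_worker_count, total_cores, logical_core_for_ccl=False):
--     '''
--     I_MPI_PIN_DOMAIN specify the cores used for every MPI process.
--     1)use physical core for oneccl
--     The first ccl_worker_count cores of every rank for ccl communication
--     and the other cores will be used to do computation.
--     For example: on CascadeLake 8280 CPU, 2 ranks on one node. ccl_worker_count=4
--     CCL_WORKER_COUNT=4
--     CCL_WORKER_AFFINITY="0,1,2,3,28,29,30,31"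
--     I_MPI_PIN_DOMAIN=[0xffffff0,0xffffff00000000]
--     2)use logical core oneccl
--     The first ccl_worker_count logical cores which is correponding to the
--     first ccl_worker_count physical cores are used as the ccl cores.
--     For example: on CascadeLake 8280 CPU, 2 ranks on one node. ccl_worker_count=4
--     CCL_WORKER_COUNT=4
--     CCL_WORKER_AFFINITY="56,57,58,59,84,85,86,87"
--     I_MPI_PIN_DOMAIN=[0xfffffff,0xfffffff0000000]
--     '''
--     ppn = nproc_per_node
--     cores_per_rank = total_cores // ppn
--     pin_domain = "["
--     for proc in range(ppn):
--         domain_binary = 0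
--         if logical_core_for_ccl:
--             begin = proc * cores_per_rank
--         else:
--             begin = proc * cores_per_rank + ccl_worker_count
--         end = proc * cores_per_rank + cores_per_rank - 1
--         for i in range(begin, end + 1):
--             domain_binary |= (1 << i)
--         pin_domain += hex(domain_binary) + ","
--     pin_domain += "]"
--     return pin_domain
-- ===== SOURCE B (Python) =====
-- def get_mpi_pin_domain(nproc_per_node, ccl_worker_count, total_cores, logical_core_for_ccl=False):
--     ppn = nproc_per_node
--     cores_per_rank = total_cores // ppn
--     parts = []
--     for proc in range(ppn):
--         begin = proc * cores_per_rank + (0 if logical_core_for_ccl else ccl_worker_count)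
--         end = (proc + 1) * cores_per_rank - 1
--         domain = (1 << (end + 1)) - (1 << begin) if begin <= end else 0
--         parts.append(hex(domain))
--     return "[" + "".join(p + "," for p in parts) + "]"
-- ===== Notes on version B (the rewrite author's own statement) =====
-- stated objective: simpler
-- what changed: The inner bit-by-bit OR accumulation over every core index is replaced by the closed-form mask (1 << (end+1)) - (1 << begin) (0 when the range is empty), and the string is assembled by joining a list of per-rank hex parts instead of repeated concatenation onto an accumulator.
import Mathlib
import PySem

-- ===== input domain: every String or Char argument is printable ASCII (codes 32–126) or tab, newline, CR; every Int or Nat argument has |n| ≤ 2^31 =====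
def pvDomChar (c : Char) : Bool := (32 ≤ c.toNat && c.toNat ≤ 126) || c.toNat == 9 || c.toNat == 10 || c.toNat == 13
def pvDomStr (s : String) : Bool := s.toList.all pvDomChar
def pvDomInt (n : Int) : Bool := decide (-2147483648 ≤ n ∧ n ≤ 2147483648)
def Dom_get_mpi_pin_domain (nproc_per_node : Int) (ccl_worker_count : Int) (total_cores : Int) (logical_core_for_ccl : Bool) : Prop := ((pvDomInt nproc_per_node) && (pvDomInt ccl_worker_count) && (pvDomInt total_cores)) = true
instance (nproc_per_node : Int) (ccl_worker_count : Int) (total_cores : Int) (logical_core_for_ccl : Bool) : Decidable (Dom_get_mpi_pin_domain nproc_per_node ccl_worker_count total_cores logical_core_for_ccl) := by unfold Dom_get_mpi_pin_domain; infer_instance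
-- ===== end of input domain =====

-- ===== PORT A =====
-- B replaces the per-core bit-OR accumulation with a closed-form mask and joins hex parts.
-- shared helper: Python's built-in hex(n) (both programs call it); exact for every int
def hexDigitChar (d : Nat) : Char := if d < 10 then Char.ofNat (48 + d) else Char.ofNat (87 + d)

def hexDigits : Nat → List Char
  | 0 => []
  | (n+1) => hexDigits ((n+1) / 16) ++ [hexDigitChar ((n+1) % 16)]
decreasing_by exact Nat.div_lt_self (Nat.succ_pos n) (by norm_num)

def pyHexChars (n : Int) : List Char :=
  (if n < 0 then ['-'] else []) ++ ['0', 'x'] ++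
    (if n.natAbs = 0 then ['0'] else hexDigits n.natAbs)

-- literal port of A; '1 << i' is ported as '1 <<< i.toNat', exact for 0 ≤ i (Pre_ excludes the
-- negative-shift inputs, exactly where Python raises ValueError)
def get_mpi_pin_domain (nproc_per_node : Int) (ccl_worker_count : Int) (total_cores : Int) (logical_core_for_ccl : Bool) : String :=
  let ppn := nproc_per_node
  let cores_per_rank := PySem.Int.floordiv total_cores ppn
  let pin_domain : List Char :=
    (PySem.List.pyRange 0 ppn).foldl (fun acc proc =>
      let begin_ := if logical_core_for_ccl then proc * cores_per_rank
                    else proc * cores_per_rank + ccl_worker_count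
      let end_ := proc * cores_per_rank + cores_per_rank - 1
      let domain_binary : Int :=
        (PySem.List.pyRange begin_ (end_ + 1)).foldl
          (fun d i => PySem.Int.bor d ((1 : Int) <<< i.toNat)) 0
      acc ++ (pyHexChars domain_binary ++ [','])) ['[']
  String.mk (pin_domain ++ [']'])

-- ===== PORT B =====
def get_mpi_pin_domain_alt (nproc_per_node : Int) (ccl_worker_count : Int) (total_cores : Int) (logical_core_for_ccl : Bool) : String :=
  let ppn := nproc_per_node
  let cores_per_rank := PySem.Int.floordiv total_cores ppn
  let parts : List (List Char) :=
    (PySem.List.pyRange 0 ppn).map (fun proc =>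
      let begin_ := proc * cores_per_rank + (if logical_core_for_ccl then 0 else ccl_worker_count)
      let end_ := (proc + 1) * cores_per_rank - 1
      let domain : Int :=
        if begin_ ≤ end_ then ((1 : Int) <<< (end_ + 1).toNat) - ((1 : Int) <<< begin_.toNat)
        else 0
      pyHexChars domain)
  String.mk (['['] ++ (parts.map (fun p => p ++ [','])).flatten ++ [']'])

-- ===== PRECONDITION & SPEC =====
-- Pre_ excludes exactly the inputs on which Python A raises: ZeroDivisionError when
-- nproc_per_node = 0, and ValueError ("negative shift count") when some rank's begin
-- index is negative while that rank's core range is nonempty; A returns on all other inputs.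
def Pre_get_mpi_pin_domain (nproc_per_node : Int) (ccl_worker_count : Int) (total_cores : Int) (logical_core_for_ccl : Bool) : Prop :=
  nproc_per_node ≠ 0 ∧
  (nproc_per_node < 0 ∨
    ¬((if logical_core_for_ccl then 0 else ccl_worker_count) < PySem.Int.floordiv total_cores nproc_per_node ∧
      (if 0 ≤ PySem.Int.floordiv total_cores nproc_per_node
       then (if logical_core_for_ccl then 0 else ccl_worker_count)
       else (nproc_per_node - 1) * PySem.Int.floordiv total_cores nproc_per_node +
            (if logical_core_for_ccl then 0 else ccl_worker_count)) < 0))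
instance (nproc_per_node : Int) (ccl_worker_count : Int) (total_cores : Int) (logical_core_for_ccl : Bool) : Decidable (Pre_get_mpi_pin_domain nproc_per_node ccl_worker_count total_cores logical_core_for_ccl) := by unfold Pre_get_mpi_pin_domain; infer_instance

def pvWitness_get_mpi_pin_domain : Int × Int × Int × Bool := (2, 4, 56, false)

def Spec_get_mpi_pin_domain (nproc_per_node : Int) (ccl_worker_count : Int) (total_cores : Int) (logical_core_for_ccl : Bool) (out : String) : Prop := out = get_mpi_pin_domain_alt nproc_per_node ccl_worker_count total_cores logical_core_for_ccl
instance (nproc_per_node : Int) (ccl_worker_count : Int) (total_cores : Int) (logical_core_for_ccl : Bool) (out : String) : Decidable (Spec_get_mpi_pin_domain nproc_per_node ccl_worker_count total_cores logical_core_for_ccl out) := by unfold Spec_get_mpi_pin_domain; infer_instance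

-- ===== CLAIM (what is proved, stated in full; the proofs are below) =====
def Claim_equal_get_mpi_pin_domain : Prop := ∀ (nproc_per_node : Int) (ccl_worker_count : Int) (total_cores : Int) (logical_core_for_ccl : Bool), Dom_get_mpi_pin_domain nproc_per_node ccl_worker_count total_cores logical_core_for_ccl → Pre_get_mpi_pin_domain nproc_per_node ccl_worker_count total_cores logical_core_for_ccl → Spec_get_mpi_pin_domain nproc_per_node ccl_worker_count total_cores logical_core_for_ccl (get_mpi_pin_domain nproc_per_node ccl_worker_count total_cores logical_core_for_ccl)

-- ===== LEMMAS AND PROOFS =====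
lemma lor_two_pow_of_lt {a k : Nat} (h : a < 2 ^ k) : a ||| 2 ^ k = a + 2 ^ k := by
  have := Nat.two_pow_add_eq_or_of_lt h 1
  simpa [Nat.lor_comm, Nat.add_comm] using this.symm

-- the inner OR loop of A computes the closed-form mask
lemma inner_fold (n : Nat) : ∀ (b acc : Nat), acc < 2 ^ b →
    List.foldl (fun (d i : Int) => PySem.Int.bor d ((1 : Int) <<< (i.toNat : Int))) (↑acc)
      (PySem.List.pyRange ↑b (↑b + ↑n)) = ↑(acc + (2 ^ (b + n) - 2 ^ b)) := by
  induction n with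
  | zero =>
    intro b acc h
    have hnil : PySem.List.pyRange (↑b) (↑b + ((0:Nat):Int)) = [] := by
      simp [PySem.List.pyRange]
    rw [hnil]; simp
  | succ n ih =>
    intro b acc h
    have hlt : (↑b : Int) < ↑b + ↑(n+1) := by push_cast; omega
    rw [PySem.List.pyRange_one_cons hlt]
    have hcast : (↑b : Int) + ↑(n+1) = ↑(b+1) + ↑n := by push_cast; omega
    have hsh : ((1:Int) <<< ((((↑b : Int)).toNat : Nat) : Int)) = ((2^b : Nat) : Int) := by
      rw [Int.shiftLeft_natCast_right, Int.shiftLeft_eq]; push_cast [Int.toNat_natCast]; ring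
    have hstep : PySem.Int.bor (↑acc) ((1:Int) <<< ((((↑b : Int)).toNat : Nat) : Int)) = ↑(acc + 2^b) := by
      rw [hsh, PySem.Int.bor_natCast, lor_two_pow_of_lt h]
    have hacc' : acc + 2^b < 2^(b+1) := by
      have : 2^(b+1) = 2^b + 2^b := by ring
      omega
    simp only [List.foldl_cons, hstep, hcast]
    have hb1 : ((b:Int) + 1) = ↑(b+1) := by push_cast; ring
    rw [hb1, ih (b+1) (acc + 2^b) hacc']
    congr 1
    have h1 : 2^b ≤ 2^(b+n) := Nat.pow_le_pow_right (by norm_num) (by omega)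
    have h2 : 2^(b+1) = 2^b + 2^b := by ring
    have h3 : 2^(b+1+n) = 2^(b+(n+1)) := by ring_nf
    have h4 : 2^(b+(n+1)) = 2^(b+n) + 2^(b+n) := by ring
    omega

-- per-rank: A's inner fold equals B's closed-form mask, given begin ≥ 0 whenever the range is nonempty
lemma per_rank (lo e : Int) (hnonneg : lo ≤ e → 0 ≤ lo) :
    List.foldl (fun (d i : Int) => PySem.Int.bor d ((1 : Int) <<< (i.toNat : Int))) 0
      (PySem.List.pyRange lo (e + 1)) =
    (if lo ≤ e then ((1 : Int) <<< (e + 1).toNat) - ((1 : Int) <<< lo.toNat) else 0) := by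
  by_cases hlt : lo ≤ e
  · have hlo := hnonneg hlt
    set b := lo.toNat with hb
    set n := (e + 1 - lo).toNat with hn
    have hlo' : (↑b : Int) = lo := Int.toNat_of_nonneg hlo
    have h0 : (0:Nat) < 2 ^ b := Nat.two_pow_pos b
    have hle : 2 ^ b ≤ 2 ^ (b + n) := Nat.pow_le_pow_right (by norm_num) (by omega)
    have hthis := inner_fold n b 0 h0
    have hhi' : lo + (n : Int) = e + 1 := by omega
    rw [hlo', hhi'] at hthis
    rw [if_pos hlt]
    have hhiN : (e + 1).toNat = b + n := by omega
    rw [hhiN]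
    rw [Int.shiftLeft_eq, Int.shiftLeft_eq]
    have hz : ((0:Nat) : Int) = 0 := rfl
    rw [hz] at hthis
    rw [hthis]
    push_cast [Nat.cast_sub hle]
    ring
  · have hnil : PySem.List.pyRange lo (e + 1) = [] := by
      simp [PySem.List.pyRange]; omega
    rw [hnil, if_neg hlt]
    rfl

-- ===== VERDICT (by name: the statement is the Claim_ definition above) =====
theorem get_mpi_pin_domain_spec : Claim_equal_get_mpi_pin_domain := by
  intro ppn ccl tot log _ hpre
  unfold Spec_get_mpi_pin_domain get_mpi_pin_domain get_mpi_pin_domain_alt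
  obtain ⟨hne, hpre2⟩ := hpre
  simp only []
  set cpr := PySem.Int.floordiv tot ppn with hcpr
  set c : Int := if log then 0 else ccl with hc
  rw [PySem.List.foldl_append_eq_flatMap]
  rw [List.map_map, ← List.flatMap_def]
  congr 1
  congr 1
  congr 1
  apply List.flatMap_congr
  intro proc hproc
  simp only [Function.comp]
  have hmem := (PySem.List.mem_pyRange_one).1 hproc
  have hproc0 : 0 ≤ proc := hmem.1
  have hproclt : proc < ppn := hmem.2
  have hppn : 0 < ppn := by omega
  have hpre3 : ¬(c < cpr ∧ (if 0 ≤ cpr then c else (ppn - 1) * cpr + c) < 0) := by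
    rcases hpre2 with h | h
    · omega
    · exact h
  have hbeq : (if log then proc * cpr else proc * cpr + ccl) = proc * cpr + c := by
    cases log <;> simp [hc]
  rw [hbeq]
  have hnonneg : proc * cpr + c ≤ (proc + 1) * cpr - 1 → 0 ≤ proc * cpr + c := by
    intro hlt
    have hccpr : c < cpr := by nlinarith
    by_cases hsg : 0 ≤ cpr
    · have hc0 : 0 ≤ c := by
        rcases not_and_or.mp hpre3 with h | h
        · omega
        · simp [if_pos hsg] at h; omega
      have : 0 ≤ proc * cpr := mul_nonneg hproc0 hsg
      omega
    · have hm : 0 ≤ (ppn - 1) * cpr + c := by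
        rcases not_and_or.mp hpre3 with h | h
        · omega
        · simp [if_neg hsg] at h; omega
      have hple : proc ≤ ppn - 1 := by omega
      have : (ppn - 1) * cpr ≤ proc * cpr :=
        mul_le_mul_of_nonpos_right hple (by omega)
      omega
  have hhi : proc * cpr + cpr - 1 = (proc + 1) * cpr - 1 := by ring
  rw [hhi]
  rw [per_rank (proc * cpr + c) ((proc + 1) * cpr - 1) hnonneg]
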